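-- pv_equiv track=rewrite | github.com/IonutHaidu1/joc_spanzuratoare_automat | Joc.py | joaca_un_joc
-- ===== SOURCE A (Python) =====
-- ORDINE_GHICIRE = [
--     "A","E","I","R","L",
--     "O","T","N","U","C",
--     "S","Ă","M","D","P","G","B","F","Ț","Ș","V","Z","H","Â",
--     "Î","J","K","X","Y","W","Q"
-- ]
--
-- def aflare_litere_hint(litere_ajutatoare: list[str]) -> list[str]:
--     litere_hint = []
--     for caracter in litere_ajutatoare:
--         if caracter.isalpha():
--             litere_hint.append(caracter)
--     return litere_hint
--
-- def toate_descoperite(cuvant: str, revealed: set[str]) -> bool: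
--     for litera in cuvant:
--         if litera not in revealed:
--             return False
--     return True
--
-- def joaca_un_joc(pattern_initial: str, cuvant_tinta: str):
--     litere_ajutatoare = pattern_initial
--     TARGET = cuvant_tinta
--
--     litere_hint = set(aflare_litere_hint(litere_ajutatoare))
--     revealed = {ch for ch in TARGET if ch in litere_hint}
--     incercate = set(litere_hint)
--
--     pasi = 0
--     corecte = 0
--     gresite = 0
--     secventa = []
--
--     for lit in ORDINE_GHICIRE:
--         if toate_descoperite(TARGET, revealed):
--             break
--         if lit in incercate:
--             continue
--
--         pasi += 1
--         incercate.add(lit)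
--         secventa.append(lit)
--
--         if lit in TARGET:
--             corecte += 1
--             for ch in TARGET:
--                 if ch == lit:
--                     revealed.add(ch)
--         else:
--             gresite += 1
--
--     status = "OK" if toate_descoperite(TARGET, revealed) else "FAIL"
--     secventa_str = " ".join(l.lower() for l in secventa)
--     return pasi, TARGET, status, secventa_str
-- ===== SOURCE B (Python) =====
-- ORDINE_GHICIRE = [
--     "A","E","I","R","L",
--     "O","T","N","U","C",
--     "S","Ă","M","D","P","G","B","F","Ț","Ș","V","Z","H","Â",
--     "Î","J","K","X","Y","W","Q"
-- ]
--
-- def joaca_un_joc(pattern_initial: str, cuvant_tinta: str):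
--     hint = {c for c in pattern_initial if c.isalpha()}
--     distinct = set(cuvant_tinta)
--     ramase = len(distinct - hint)
--
--     pasi = 0
--     secventa = []
--     for lit in ORDINE_GHICIRE:
--         if ramase == 0:
--             break
--         if lit in hint:
--             continue
--         pasi += 1
--         secventa.append(lit.lower())
--         if lit in distinct:
--             ramase -= 1
--
--     status = "OK" if ramase == 0 else "FAIL"
--     return pasi, cuvant_tinta, status, " ".join(secventa)
-- ===== Notes on version B (the rewrite author's own statement) =====
-- stated objective: simpler
-- what changed: B precomputes the distinct target characters and keeps a single counter (ramase) of those still hidden and a fixed hint set, so the loop maintains no revealed/incercate sets, never re-scans the word (all toate_descoperite calls are gone), stores already-lowered letters, and derives the final status from ramase == 0.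
import Mathlib
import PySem

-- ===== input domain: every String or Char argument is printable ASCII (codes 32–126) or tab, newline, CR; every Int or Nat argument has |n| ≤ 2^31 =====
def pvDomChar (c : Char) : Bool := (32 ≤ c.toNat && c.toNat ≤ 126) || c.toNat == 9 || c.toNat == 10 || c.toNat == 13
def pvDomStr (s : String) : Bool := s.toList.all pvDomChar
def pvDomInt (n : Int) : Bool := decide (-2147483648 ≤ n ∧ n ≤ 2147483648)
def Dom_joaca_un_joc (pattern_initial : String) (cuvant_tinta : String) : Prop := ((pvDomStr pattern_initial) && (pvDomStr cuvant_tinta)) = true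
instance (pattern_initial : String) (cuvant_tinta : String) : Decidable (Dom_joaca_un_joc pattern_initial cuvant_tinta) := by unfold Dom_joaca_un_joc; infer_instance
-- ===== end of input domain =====

-- B replaces A's per-step toate_descoperite re-scans and mutated revealed/incercate sets by one
-- precomputed counter of still-hidden distinct characters (objective: simpler).

-- ===== PORT A =====
-- ORDINE_GHICIRE: every Python element is a one-character string, so each is held as its Char
-- (for a one-character string, 'lit in TARGET' is exactly Char membership, 'lit in incercate' likewise).
def ordineGhicire : List Char :=
  ['A','E','I','R','L','O','T','N','U','C','S','Ă','M','D','P','G','B','F','Ț','Ș','V','Z','H','Â','Î','J','K','X','Y','W','Q']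

-- str.lower() on one element of ORDINE_GHICIRE: exact for 'A'-'Z' (PySem.Chars.lowerChar) and
-- hand-ported for the five Romanian letters of that list; both ports apply it to those letters only.
def guessLower (c : Char) : Char :=
  if c = 'Ă' then 'ă' else if c = 'Ț' then 'ț' else if c = 'Ș' then 'ș'
  else if c = 'Â' then 'â' else if c = 'Î' then 'î' else PySem.Chars.lowerChar c

def aflareLitereHint (litere_ajutatoare : List Char) : List Char :=
  litere_ajutatoare.foldl (fun acc caracter => if PySem.Chars.isalpha caracter then acc ++ [caracter] else acc) []

def toateDescoperite (cuvant : List Char) (revealed : PySem.Set Char) : Bool :=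
  match cuvant with
  | [] => true
  | litera :: rest => if !(PySem.Set.contains revealed litera) then false else toateDescoperite rest revealed

-- A's 'for lit in ORDINE_GHICIRE' loop, break/continue as recursion over the list
def loopA (lits : List Char) (TARGET : List Char) (pasi corecte gresite : Int)
    (secventa : List Char) (revealed incercate : PySem.Set Char) :
    Int × Int × Int × List Char × PySem.Set Char × PySem.Set Char :=
  match lits with
  | [] => (pasi, corecte, gresite, secventa, revealed, incercate)
  | lit :: rest =>
    if toateDescoperite TARGET revealed then (pasi, corecte, gresite, secventa, revealed, incercate)
    else if PySem.Set.contains incercate lit then loopA rest TARGET pasi corecte gresite secventa revealed incercate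
    else
      let pasi' := pasi + 1
      let incercate' := PySem.Set.add incercate lit
      let secventa' := secventa ++ [lit]
      if TARGET.contains lit then
        let revealed' := TARGET.foldl (fun r ch => if ch == lit then PySem.Set.add r ch else r) revealed
        loopA rest TARGET pasi' (corecte + 1) gresite secventa' revealed' incercate'
      else
        loopA rest TARGET pasi' corecte (gresite + 1) secventa' revealed incercate'

def joaca_un_joc (pattern_initial : String) (cuvant_tinta : String) : Int × String × String × String :=
  let TARGET := cuvant_tinta.toList
  let litere_hint : PySem.Set Char := PySem.Set.ofList (aflareLitereHint pattern_initial.toList)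
  let revealed : PySem.Set Char := PySem.Set.ofList (TARGET.filter (fun ch => PySem.Set.contains litere_hint ch))
  let incercate : PySem.Set Char := PySem.Set.ofList litere_hint
  let res := loopA ordineGhicire TARGET 0 0 0 [] revealed incercate
  let pasi := res.1
  let secventa := res.2.2.2.1
  let revealedF := res.2.2.2.2.1
  let status := if toateDescoperite TARGET revealedF then "OK" else "FAIL"
  (pasi, cuvant_tinta, status, String.ofList (PySem.Chars.join [' '] (secventa.map (fun l => [guessLower l]))))

-- ===== PORT B =====
-- Source B's 'for lit in ORDINE_GHICIRE' loop: only pasi, ramase and the already-lowered secventa are carried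
def loopB (lits : List Char) (hint distinct : PySem.Set Char) (pasi ramase : Int) (secventa : List Char) :
    Int × Int × List Char :=
  match lits with
  | [] => (pasi, ramase, secventa)
  | lit :: rest =>
    if ramase == 0 then (pasi, ramase, secventa)
    else if PySem.Set.contains hint lit then loopB rest hint distinct pasi ramase secventa
    else if PySem.Set.contains distinct lit then
      loopB rest hint distinct (pasi + 1) (ramase - 1) (secventa ++ [guessLower lit])
    else
      loopB rest hint distinct (pasi + 1) ramase (secventa ++ [guessLower lit])

def joaca_un_joc_alt (pattern_initial : String) (cuvant_tinta : String) : Int × String × String × String :=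
  let hint : PySem.Set Char := PySem.Set.ofList (pattern_initial.toList.filter (fun c => PySem.Chars.isalpha c))
  let distinct : PySem.Set Char := PySem.Set.ofList cuvant_tinta.toList
  let ramase : Int := (PySem.Set.diff distinct hint).length
  let res := loopB ordineGhicire hint distinct 0 ramase []
  let status := if res.2.1 == 0 then "OK" else "FAIL"
  (res.1, cuvant_tinta, status, String.ofList (PySem.Chars.join [' '] (res.2.2.map (fun l => [l]))))

-- ===== PRECONDITION & SPEC =====
def Spec_joaca_un_joc (pattern_initial : String) (cuvant_tinta : String) (out : Int × String × String × String) : Prop := out = joaca_un_joc_alt pattern_initial cuvant_tinta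
instance (pattern_initial : String) (cuvant_tinta : String) (out : Int × String × String × String) : Decidable (Spec_joaca_un_joc pattern_initial cuvant_tinta out) := by unfold Spec_joaca_un_joc; infer_instance

-- ===== CLAIM (what is proved, stated in full; the proofs are below) =====
def Claim_equal_joaca_un_joc : Prop := ∀ (pattern_initial : String) (cuvant_tinta : String), Dom_joaca_un_joc pattern_initial cuvant_tinta → Spec_joaca_un_joc pattern_initial cuvant_tinta (joaca_un_joc pattern_initial cuvant_tinta)

-- ===== LEMMAS AND PROOFS =====

theorem toateDescoperite_iff (cuvant : List Char) (revealed : PySem.Set Char) :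
    toateDescoperite cuvant revealed = true ↔ ∀ c ∈ cuvant, c ∈ revealed := by
  induction cuvant with
  | nil => simp [toateDescoperite]
  | cons c rest ih =>
    by_cases h : c ∈ revealed
    · simp [toateDescoperite, ih, h]
    · have hc : revealed.contains c = false := by
        rw [Bool.eq_false_iff]; intro hc; exact h ((PySem.Set.contains_iff revealed c).mp hc)
      simp [toateDescoperite, h]

theorem revFold_mem (TARGET : List Char) (lit : Char) (r : PySem.Set Char) (c : Char) :
    c ∈ TARGET.foldl (fun r ch => if ch == lit then PySem.Set.add r ch else r) r ↔
      c ∈ r ∨ (c = lit ∧ lit ∈ TARGET) := by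
  induction TARGET generalizing r with
  | nil => simp
  | cons ch rest ih =>
    simp only [List.foldl_cons]
    by_cases h : ch = lit
    · subst h
      simp only [BEq.rfl, if_pos]
      rw [ih]
      simp [PySem.Set.mem_add]
      tauto
    · rw [if_neg (by simp [h]), ih]
      have hl : lit ∈ ch :: rest ↔ lit ∈ rest := by
        rw [List.mem_cons]
        constructor
        · rintro (e | e)
          · exact absurd e.symm h
          · exact e
        · exact Or.inr
      rw [hl]

theorem filter_erase_length (S : List Char) (p : Char → Bool) (lit : Char)
    (hS : S.Nodup) (hmem : lit ∈ S) (hp : p lit = true) :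
    (S.filter (fun c => p c && !(c == lit))).length + 1 = (S.filter p).length := by
  induction S with
  | nil => cases hmem
  | cons a rest ih =>
    rcases List.nodup_cons.mp hS with ⟨ha, hrest⟩
    by_cases h : a = lit
    · subst h
      have hcongr : ∀ c ∈ rest, (p c && !(c == a)) = p c := by
        intro c hc
        have : (c == a) = false := by
          rw [beq_eq_false_iff_ne]; intro e; exact ha (e ▸ hc)
        simp [this]
      rw [List.filter_cons, List.filter_cons]
      simp [hp, List.filter_congr hcongr]
    · have hmem' : lit ∈ rest := by
        rcases List.mem_cons.mp hmem with h1 | h1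
        · exact absurd h1.symm h
        · exact h1
      rw [List.filter_cons, List.filter_cons]
      by_cases hpa : p a = true
      · have : (a == lit) = false := by rw [beq_eq_false_iff_ne]; exact h
        simp only [hpa, this, Bool.not_false, Bool.and_true, if_true, List.length_cons]
        have := ih hrest hmem'
        omega
      · simp only [Bool.eq_false_iff.mpr hpa, Bool.false_and, if_false]
        exact ih hrest hmem'

theorem toate_eq_ramase (TARGET : List Char) (revealed incercate : PySem.Set Char) (ramase : Int)
    (hrev : ∀ c, c ∈ revealed ↔ (c ∈ TARGET ∧ c ∈ incercate))
    (hram : ramase = (((PySem.Set.ofList TARGET).filter (fun c => !(PySem.Set.contains incercate c))).length : Int)) :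
    toateDescoperite TARGET revealed = (ramase == 0) := by
  rw [Bool.eq_iff_iff, toateDescoperite_iff, beq_iff_eq, hram]
  rw [show ((((PySem.Set.ofList TARGET).filter (fun c => !(PySem.Set.contains incercate c))).length : Int) = 0 ↔
      ((PySem.Set.ofList TARGET).filter (fun c => !(PySem.Set.contains incercate c))).length = 0) from by omega]
  rw [List.length_eq_zero_iff, List.filter_eq_nil_iff]
  constructor
  · intro h c hc
    have hct : c ∈ TARGET := (PySem.Set.mem_ofList TARGET c).mp hc
    have hin : c ∈ incercate := ((hrev c).mp (h c hct)).2
    simp [hin]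
  · intro h c hc
    have := h c ((PySem.Set.mem_ofList TARGET c).mpr hc)
    rw [hrev c]
    refine ⟨hc, ?_⟩
    rw [← PySem.Set.contains_iff]
    revert this
    cases PySem.Set.contains incercate c <;> simp

theorem loop_eq (lits TARGET : List Char) (pasi corecte gresite : Int) (secventa : List Char)
    (revealed incercate hint : PySem.Set Char) (ramase : Int)
    (hnd : lits.Nodup)
    (hinc : ∀ c ∈ lits, (c ∈ incercate ↔ c ∈ hint))
    (hrev : ∀ c, c ∈ revealed ↔ (c ∈ TARGET ∧ c ∈ incercate))
    (hram : ramase = (((PySem.Set.ofList TARGET).filter (fun c => !(PySem.Set.contains incercate c))).length : Int)) :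
    (loopA lits TARGET pasi corecte gresite secventa revealed incercate).1 =
      (loopB lits hint (PySem.Set.ofList TARGET) pasi ramase (secventa.map guessLower)).1 ∧
    (loopB lits hint (PySem.Set.ofList TARGET) pasi ramase (secventa.map guessLower)).2.2 =
      ((loopA lits TARGET pasi corecte gresite secventa revealed incercate).2.2.2.1).map guessLower ∧
    (toateDescoperite TARGET (loopA lits TARGET pasi corecte gresite secventa revealed incercate).2.2.2.2.1 =
      ((loopB lits hint (PySem.Set.ofList TARGET) pasi ramase (secventa.map guessLower)).2.1 == 0)) := by
  induction lits generalizing pasi corecte gresite secventa revealed incercate ramase with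
  | nil =>
    refine ⟨rfl, rfl, ?_⟩
    exact toate_eq_ramase TARGET revealed incercate ramase hrev hram
  | cons lit rest ih =>
    rcases List.nodup_cons.mp hnd with ⟨hlr, hndr⟩
    have hbool := toate_eq_ramase TARGET revealed incercate ramase hrev hram
    by_cases ht : toateDescoperite TARGET revealed = true
    · have hr0 : (ramase == 0) = true := hbool ▸ ht
      simp [loopA, loopB, ht, hr0]
    · have hr0 : (ramase == 0) = false := by rw [← hbool, Bool.eq_false_iff]; exact ht
      have hcontains : PySem.Set.contains incercate lit = PySem.Set.contains hint lit := by
        rw [Bool.eq_iff_iff, PySem.Set.contains_iff, PySem.Set.contains_iff]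
        exact hinc lit List.mem_cons_self
      have ht' : toateDescoperite TARGET revealed = false := Bool.eq_false_iff.mpr ht
      have hdis : PySem.Set.contains (PySem.Set.ofList TARGET) lit = TARGET.contains lit := by
        simp [PySem.Set.mem_ofList]
      simp only [loopA, loopB, ht', hr0, Bool.false_eq_true, ite_false, hcontains, hdis]
      by_cases htry : lit ∈ hint
      · -- continue: already tried
        have : PySem.Set.contains hint lit = true := (PySem.Set.contains_iff hint lit).mpr htry
        simp only [this, ite_true]
        exact ih pasi corecte gresite secventa revealed incercate ramase hndr
          (fun c hc => hinc c (List.mem_cons_of_mem _ hc)) hrev hram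
      · have hninc : lit ∉ incercate := fun hx => htry ((hinc lit List.mem_cons_self).mp hx)
        have : PySem.Set.contains hint lit = false := by
          rw [Bool.eq_false_iff]; intro hx; exact htry ((PySem.Set.contains_iff hint lit).mp hx)
        simp only [this, Bool.false_eq_true, ite_false]
        have hinc' : ∀ c ∈ rest, (c ∈ PySem.Set.add incercate lit ↔ c ∈ hint) := by
          intro c hc
          rw [PySem.Set.mem_add]
          have hne : c ≠ lit := fun e => hlr (e ▸ hc)
          constructor
          · rintro (h1 | h1)
            · exact (hinc c (List.mem_cons_of_mem _ hc)).mp h1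
            · exact absurd h1 hne
          · intro h1; exact Or.inl ((hinc c (List.mem_cons_of_mem _ hc)).mpr h1)
        by_cases hT : lit ∈ TARGET
        · have hTc : TARGET.contains lit = true := by simpa using hT
          simp only [hTc, ite_true]
          have hrev' : ∀ c, c ∈ TARGET.foldl (fun r ch => if ch == lit then PySem.Set.add r ch else r) revealed ↔
              (c ∈ TARGET ∧ c ∈ PySem.Set.add incercate lit) := by
            intro c
            rw [revFold_mem, PySem.Set.mem_add, hrev c]
            constructor
            · rintro (⟨h1, h2⟩ | ⟨h1, h2⟩)
              · exact ⟨h1, Or.inl h2⟩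
              · exact ⟨h1 ▸ h2, Or.inr h1⟩
            · rintro ⟨h1, h2 | h2⟩
              · exact Or.inl ⟨h1, h2⟩
              · exact Or.inr ⟨h2, h2 ▸ h1⟩
          have hlen := filter_erase_length (PySem.Set.ofList TARGET)
            (fun c => !(PySem.Set.contains incercate c)) lit (PySem.Set.nodup_ofList TARGET)
            ((PySem.Set.mem_ofList TARGET lit).mpr hT)
            (by simp [hninc])
          have hram' : ramase - 1 = ((((PySem.Set.ofList TARGET).filter
              (fun c => !(PySem.Set.contains (PySem.Set.add incercate lit) c))).length : Int)) := by
            have hpred : ∀ c ∈ PySem.Set.ofList TARGET,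
                (!(PySem.Set.contains (PySem.Set.add incercate lit) c)) =
                ((!(PySem.Set.contains incercate c)) && !(c == lit)) := by
              intro c _
              rw [PySem.Set.add_of_not_mem hninc]
              by_cases h : c = lit
              · subst h; simp [hninc]
              · simp [h]
            rw [List.filter_congr hpred]
            beta_reduce at hlen
            omega
          have := ih (pasi + 1) (corecte + 1) gresite (secventa ++ [lit])
            (TARGET.foldl (fun r ch => if ch == lit then PySem.Set.add r ch else r) revealed)
            (PySem.Set.add incercate lit) (ramase - 1) hndr hinc' hrev' hram'
          simpa [List.map_append] using this
        · have hTc : TARGET.contains lit = false := by simpa using hT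
          simp only [hTc, Bool.false_eq_true, ite_false]
          have hrev' : ∀ c, c ∈ revealed ↔ (c ∈ TARGET ∧ c ∈ PySem.Set.add incercate lit) := by
            intro c
            rw [hrev c, PySem.Set.mem_add]
            constructor
            · rintro ⟨h1, h2⟩; exact ⟨h1, Or.inl h2⟩
            · rintro ⟨h1, h2 | h2⟩
              · exact ⟨h1, h2⟩
              · exact absurd (h2 ▸ h1) hT
          have hram' : ramase = ((((PySem.Set.ofList TARGET).filter
              (fun c => !(PySem.Set.contains (PySem.Set.add incercate lit) c))).length : Int)) := by
            have hpred : ∀ c ∈ PySem.Set.ofList TARGET,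
                (!(PySem.Set.contains (PySem.Set.add incercate lit) c)) =
                (!(PySem.Set.contains incercate c)) := by
              intro c hc
              have hne : c ≠ lit := fun e => hT (e ▸ (PySem.Set.mem_ofList TARGET c).mp hc)
              rw [PySem.Set.add_of_not_mem hninc]
              simp [hne]
            rw [hram, List.filter_congr hpred]
          have := ih (pasi + 1) corecte (gresite + 1) (secventa ++ [lit]) revealed
            (PySem.Set.add incercate lit) ramase hndr hinc' hrev' hram'
          simpa [List.map_append] using this

theorem joaca_un_joc_eq_alt (p t : String) : joaca_un_joc p t = joaca_un_joc_alt p t := by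
  have hhint : aflareLitereHint p.toList = p.toList.filter (fun c => PySem.Chars.isalpha c) := by
    unfold aflareLitereHint
    simpa using PySem.List.foldl_append_if_eq_filter (fun c => PySem.Chars.isalpha c) p.toList []
  simp only [joaca_un_joc, joaca_un_joc_alt, hhint, PySem.Set.ofList_ofList]
  have hrev0 : ∀ c, c ∈ PySem.Set.ofList (t.toList.filter (fun ch =>
      PySem.Set.contains (PySem.Set.ofList (p.toList.filter (fun c => PySem.Chars.isalpha c))) ch)) ↔
      (c ∈ t.toList ∧ c ∈ PySem.Set.ofList (p.toList.filter (fun c => PySem.Chars.isalpha c))) := by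
    intro c
    rw [PySem.Set.mem_ofList, List.mem_filter]
    simp
  obtain ⟨h1, h2, h3⟩ := loop_eq ordineGhicire t.toList 0 0 0 []
    (PySem.Set.ofList (t.toList.filter (fun ch =>
      PySem.Set.contains (PySem.Set.ofList (p.toList.filter (fun c => PySem.Chars.isalpha c))) ch)))
    (PySem.Set.ofList (p.toList.filter (fun c => PySem.Chars.isalpha c)))
    (PySem.Set.ofList (p.toList.filter (fun c => PySem.Chars.isalpha c)))
    ((PySem.Set.diff (PySem.Set.ofList t.toList) (PySem.Set.ofList (p.toList.filter (fun c => PySem.Chars.isalpha c)))).length : Int)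
    (by decide) (fun c _ => Iff.rfl) hrev0 rfl
  simp only [List.map_nil] at h1 h2 h3
  rw [Prod.mk.injEq, Prod.mk.injEq, Prod.mk.injEq]
  refine ⟨h1, rfl, by rw [h3], ?_⟩
  rw [h2]
  simp only [List.map_map, Function.comp_def]

-- ===== VERDICT (by name: the statement is the Claim_ definition above) =====
theorem joaca_un_joc_spec : Claim_equal_joaca_un_joc := by
  intro p t _
  unfold Spec_joaca_un_joc
  exact joaca_un_joc_eq_alt p t
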